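-- pv_equiv track=rewrite | github.com/rloza08/NSMK-Code | utils/auto_utils.py | is_valid_serial_number
-- ===== SOURCE A (Python) =====
-- def is_valid_serial_number(serial):
--     if len(serial) != 14:
--         return False
--
--     blocks = serial.split("-")
--     if len(blocks) != 3:
--         return False
--
--     for block in blocks:
--         if len(block) !=4:
--             return False
--     return True
-- ===== SOURCE B (Python) =====
-- def is_valid_serial_number(serial):
--     # positional check: 14 chars, exactly two dashes, located at indices 4 and 9
--     return (len(serial) == 14 and serial.count("-") == 2
--             and serial[4] == "-" and serial[9] == "-")
-- ===== Notes on version B (the rewrite author's own statement) =====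
-- stated objective: simpler
-- what changed: Replaces the split-into-blocks-and-loop validation by a direct positional test: length 14, dash count 2, dashes at indices 4 and 9.
import Mathlib
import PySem

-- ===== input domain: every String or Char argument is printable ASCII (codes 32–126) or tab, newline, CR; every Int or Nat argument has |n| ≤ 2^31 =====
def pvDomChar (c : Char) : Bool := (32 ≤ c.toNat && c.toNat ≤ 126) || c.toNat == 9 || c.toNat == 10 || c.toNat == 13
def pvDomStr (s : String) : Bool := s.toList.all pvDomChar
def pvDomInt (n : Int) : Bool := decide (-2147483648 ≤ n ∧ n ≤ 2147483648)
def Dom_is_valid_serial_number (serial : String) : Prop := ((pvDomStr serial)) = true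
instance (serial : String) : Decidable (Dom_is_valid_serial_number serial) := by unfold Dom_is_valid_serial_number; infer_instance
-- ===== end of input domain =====

-- B validates the serial positionally (length 14, two dashes, at indices 4 and 9) instead of splitting into blocks and looping; objective: simpler.


-- ===== PORT A =====
def is_valid_serial_number (serial : String) : Bool :=
  if PySem.Str.len serial ≠ 14 then false
  else
    match PySem.Str.split? serial "-" with
    | none => false   -- unreachable: the separator "-" is nonempty, split never raises
    | some blocks =>
      if PySem.List.len blocks ≠ 3 then false
      else blocks.all (fun block => PySem.Str.len block == 4)   -- the for-loop with its early 'return False'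

-- ===== PORT B =====
def is_valid_serial_number_alt (serial : String) : Bool :=
  PySem.Str.len serial == 14 && PySem.Str.count serial "-" == 2
    && PySem.Str.pyGet? serial 4 == some '-' && PySem.Str.pyGet? serial 9 == some '-'

-- ===== PRECONDITION & SPEC =====
def Spec_is_valid_serial_number (serial : String) (out : Bool) : Prop := out = is_valid_serial_number_alt serial
instance (serial : String) (out : Bool) : Decidable (Spec_is_valid_serial_number serial out) := by unfold Spec_is_valid_serial_number; infer_instance

-- ===== CLAIM (what is proved, stated in full; the proofs are below) =====
def Claim_equal_is_valid_serial_number : Prop := ∀ (serial : String), Dom_is_valid_serial_number serial → Spec_is_valid_serial_number serial (is_valid_serial_number serial)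

-- ===== LEMMAS AND PROOFS =====

-- pure model of splitting on a single dash
def pvParts : List Char → List (List Char)
  | [] => [[]]
  | c :: rest => if c = '-' then [] :: pvParts rest else (pvParts rest).modifyHead (c :: ·)

theorem pvParts_ne_nil (cs : List Char) : pvParts cs ≠ [] := by
  induction cs with
  | nil => simp [pvParts]
  | cons c rest ih =>
    simp only [pvParts]
    split
    · simp
    · intro h; exact ih (by simpa using List.modifyHead_eq_nil_iff.mp h)

theorem pv_go_eq : ∀ (fuel : Nat) (cs cur : List Char) (acc : List (List Char)),
    cs.length ≤ fuel →
    PySem.Chars.splitOn.go ['-'] fuel cs cur acc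
      = acc.reverse ++ (pvParts cs).modifyHead (cur.reverse ++ ·) := by
  intro fuel
  induction fuel with
  | zero =>
    intro cs cur acc h
    have : cs = [] := List.eq_nil_of_length_eq_zero (Nat.le_zero.mp h)
    subst this
    simp [PySem.Chars.splitOn.go, pvParts]
  | succ n ih =>
    intro cs cur acc h
    cases cs with
    | nil => simp [PySem.Chars.splitOn.go, pvParts]
    | cons c rest =>
      simp only [PySem.Chars.splitOn.go]
      by_cases hc : c = '-'
      · subst hc
        rw [if_pos (by simp [List.isPrefixOf])]
        rw [show List.drop (['-'] : List Char).length ('-' :: rest) = rest from rfl]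
        rw [ih rest [] (cur.reverse :: acc) (by simpa using Nat.le_of_succ_le_succ h)]
        simp only [pvParts, if_pos rfl]
        cases pvParts rest <;> simp
      · rw [if_neg (by simp [List.isPrefixOf]; exact fun h' => hc h'.symm)]
        rw [ih rest (c :: cur) acc (by simpa using Nat.le_of_succ_le_succ h)]
        obtain ⟨p, ps, hp⟩ := List.exists_cons_of_ne_nil (pvParts_ne_nil rest)
        simp [pvParts, hc, hp]

theorem pv_splitOn_eq (cs : List Char) : PySem.Chars.splitOn cs ['-'] = pvParts cs := by
  rw [PySem.Chars.splitOn, pv_go_eq (cs.length + 1) cs [] [] (Nat.le_succ _)]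
  obtain ⟨p, ps, hp⟩ := List.exists_cons_of_ne_nil (pvParts_ne_nil cs)
  simp [hp]

theorem pv_count_go_eq : ∀ (fuel : Nat) (cs : List Char) (acc : Nat),
    cs.length ≤ fuel →
    PySem.Chars.count.go ['-'] fuel cs acc = acc + cs.count '-' := by
  intro fuel
  induction fuel with
  | zero =>
    intro cs acc h
    have : cs = [] := List.eq_nil_of_length_eq_zero (Nat.le_zero.mp h)
    subst this; simp [PySem.Chars.count.go]
  | succ n ih =>
    intro cs acc h
    cases cs with
    | nil => simp [PySem.Chars.count.go]
    | cons c rest =>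
      simp only [PySem.Chars.count.go]
      by_cases hc : c = '-'
      · subst hc
        rw [if_pos (by simp [List.isPrefixOf])]
        rw [show List.drop (['-'] : List Char).length ('-' :: rest) = rest from rfl]
        rw [ih rest (acc + 1) (by simpa using Nat.le_of_succ_le_succ h)]
        simp [List.count_cons]
        omega
      · rw [if_neg (by simp [List.isPrefixOf]; exact fun h' => hc h'.symm)]
        rw [ih rest acc (by simpa using Nat.le_of_succ_le_succ h)]
        simp [List.count_cons, hc]

theorem pv_count_eq (cs : List Char) : PySem.Chars.count cs ['-'] = cs.count '-' := by
  rw [PySem.Chars.count]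
  simp only [List.isEmpty_cons, if_neg]
  exact pv_count_go_eq cs.length cs 0 le_rfl |>.trans (by omega)

theorem pvParts_noDash (a : List Char) (h : '-' ∉ a) : pvParts a = [a] := by
  induction a with
  | nil => rfl
  | cons c rest ih =>
    simp only [pvParts]
    rw [if_neg (by intro hc; exact h (by simp [hc]))]
    rw [ih (fun hm => h (by simp [hm]))]
    rfl

theorem pvParts_block (a rest : List Char) (h : '-' ∉ a) :
    pvParts (a ++ '-' :: rest) = a :: pvParts rest := by
  induction a with
  | nil => simp [pvParts]
  | cons c t ih =>
    simp only [List.cons_append, pvParts]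
    rw [if_neg (by intro hc; exact h (by simp [hc]))]
    rw [ih (fun hm => h (by simp [hm]))]
    rfl

def pvJoin : List (List Char) → List Char
  | [] => []
  | [b] => b
  | b :: bs => b ++ '-' :: pvJoin bs

theorem pvJoin_pvParts (cs : List Char) : pvJoin (pvParts cs) = cs := by
  induction cs with
  | nil => rfl
  | cons c rest ih =>
    simp only [pvParts]
    by_cases hc : c = '-'
    · subst hc; rw [if_pos rfl]
      obtain ⟨p, ps, hp⟩ := List.exists_cons_of_ne_nil (pvParts_ne_nil rest)
      rw [hp] at ih ⊢
      simpa [pvJoin] using ih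
    · rw [if_neg hc]
      obtain ⟨p, ps, hp⟩ := List.exists_cons_of_ne_nil (pvParts_ne_nil rest)
      rw [hp] at ih ⊢
      cases ps with
      | nil => simpa [pvJoin] using ih
      | cons q qs => simpa [pvJoin] using ih

theorem pvParts_dashFree (cs : List Char) : ∀ b ∈ pvParts cs, '-' ∉ b := by
  induction cs with
  | nil => intro b hb; simp [pvParts] at hb; simp [hb]
  | cons c rest ih =>
    intro b hb
    simp only [pvParts] at hb
    by_cases hc : c = '-'
    · subst hc; rw [if_pos rfl] at hb
      rcases List.mem_cons.mp hb with h | h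
      · simp [h]
      · exact ih b h
    · rw [if_neg hc] at hb
      obtain ⟨p, ps, hp⟩ := List.exists_cons_of_ne_nil (pvParts_ne_nil rest)
      rw [hp] at hb
      rcases List.mem_cons.mp hb with h | h
      · subst h
        intro hm
        rcases List.mem_cons.mp hm with h' | h'
        · exact hc h'.symm
        · exact ih p (by rw [hp]; exact List.mem_cons_self) h'
      · exact ih b (by rw [hp]; exact List.mem_cons_of_mem _ h)

theorem pv_main (cs : List Char) (hlen : cs.length = 14) :
    ((pvParts cs).length = 3 ∧ ∀ b ∈ pvParts cs, b.length = 4)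
    ↔ (cs.count '-' = 2 ∧ cs[4]? = some '-' ∧ cs[9]? = some '-') := by
  constructor
  · rintro ⟨h3, h4⟩
    obtain ⟨b1, b2, b3, hps⟩ : ∃ b1 b2 b3, pvParts cs = [b1, b2, b3] := by
      match hp : pvParts cs, h3 with
      | [b1, b2, b3], _ => exact ⟨b1, b2, b3, rfl⟩
    have hcs : cs = b1 ++ '-' :: (b2 ++ '-' :: b3) := by
      have hj := pvJoin_pvParts cs
      rw [hps] at hj
      rw [← hj]; rfl
    have hb1 : b1.length = 4 := h4 b1 (by rw [hps]; simp)
    have hb2 : b2.length = 4 := h4 b2 (by rw [hps]; simp)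
    have hb3 : b3.length = 4 := h4 b3 (by rw [hps]; simp)
    have hd1 : '-' ∉ b1 := pvParts_dashFree cs b1 (by rw [hps]; simp)
    have hd2 : '-' ∉ b2 := pvParts_dashFree cs b2 (by rw [hps]; simp)
    have hd3 : '-' ∉ b3 := pvParts_dashFree cs b3 (by rw [hps]; simp)
    subst hcs
    refine ⟨?_, ?_, ?_⟩
    · simp [List.count_append, List.count_cons,
        List.count_eq_zero.mpr hd1, List.count_eq_zero.mpr hd2, List.count_eq_zero.mpr hd3]
    · rw [List.getElem?_append_right (by omega)]
      simp [hb1]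
    · rw [List.getElem?_append_right (by omega)]
      rw [show 9 - b1.length = 5 by omega]
      show (('-' : Char) :: (b2 ++ '-' :: b3))[5]? = some '-'
      rw [show ((('-' : Char) :: (b2 ++ '-' :: b3))[5]? = (b2 ++ '-' :: b3)[4]?) from rfl]
      rw [List.getElem?_append_right (by omega)]
      simp [hb2]
  · rintro ⟨hc, h4, h9⟩
    have h4' : cs[4]'(by omega) = '-' := by
      have := List.getElem?_eq_getElem (l := cs) (i := 4) (by omega)
      rw [this] at h4; exact Option.some_injective _ h4
    have h9' : cs[9]'(by omega) = '-' := by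
      have := List.getElem?_eq_getElem (l := cs) (i := 9) (by omega)
      rw [this] at h9; exact Option.some_injective _ h9
    have hb1 : (cs.take 4).length = 4 := by simp [hlen]
    have hb2 : ((cs.drop 5).take 4).length = 4 := by simp [hlen]
    have hb3 : (cs.drop 10).length = 4 := by simp [hlen]
    have hcs : cs = cs.take 4 ++ '-' :: ((cs.drop 5).take 4 ++ '-' :: cs.drop 10) := by
      conv_lhs => rw [← List.take_append_drop 4 cs]
      congr 1
      rw [List.drop_eq_getElem_cons (l := cs) (i := 4) (by omega), h4']
      congr 1
      conv_lhs => rw [← List.take_append_drop 4 (cs.drop 5)]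
      congr 1
      rw [List.drop_drop]
      rw [List.drop_eq_getElem_cons (l := cs) (i := 9) (by omega), h9']
    have hcnt : (cs.take 4).count '-' + ((cs.drop 5).take 4).count '-' + (cs.drop 10).count '-' = 0 := by
      conv_lhs at hc => rw [hcs]
      simp [List.count_append, List.count_cons] at hc
      omega
    have hd1 : '-' ∉ cs.take 4 := List.count_eq_zero.mp (by omega)
    have hd2 : '-' ∉ (cs.drop 5).take 4 := List.count_eq_zero.mp (by omega)
    have hd3 : '-' ∉ cs.drop 10 := List.count_eq_zero.mp (by omega)
    have hps : pvParts cs = [cs.take 4, (cs.drop 5).take 4, cs.drop 10] := by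
      conv_lhs => rw [hcs]
      rw [pvParts_block _ _ hd1, pvParts_block _ _ hd2, pvParts_noDash _ hd3]
    refine ⟨by rw [hps]; rfl, ?_⟩
    intro b hb
    rw [hps] at hb
    rcases List.mem_cons.mp hb with h | hb
    · rw [h]; exact hb1
    rcases List.mem_cons.mp hb with h | hb
    · rw [h]; exact hb2
    rcases List.mem_cons.mp hb with h | hb
    · rw [h]; exact hb3
    · cases hb

-- ===== VERDICT (by name: the statement is the Claim_ definition above) =====
theorem pv_A_iff (serial : String) (blocks : List String)
    (hbl : PySem.Str.split? serial "-" = some blocks)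
    (hmap : blocks.map String.toList = pvParts serial.toList)
    (hl : serial.toList.length = 14) :
    is_valid_serial_number serial = true
      ↔ ((pvParts serial.toList).length = 3 ∧ ∀ b ∈ pvParts serial.toList, b.length = 4) := by
  unfold is_valid_serial_number
  rw [PySem.Str.len_eq, hl, if_neg (by simp), hbl]
  simp only [PySem.List.len_eq]
  split_ifs with h3
  · simp only [false_iff]
    rintro ⟨hlen3, -⟩
    apply h3
    rw [← hmap] at hlen3
    simp at hlen3
    exact_mod_cast hlen3
  · have h3' : (pvParts serial.toList).length = 3 := by
      rw [← hmap]; simp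
      have : (blocks.length : Int) = 3 := by omega
      exact_mod_cast this
    simp only [h3', true_and, List.all_eq_true]
    rw [← hmap]
    simp only [List.forall_mem_map, PySem.Str.len_eq, beq_iff_eq]
    constructor
    · intro h b hb; have := h b hb; exact_mod_cast this
    · intro h b hb; have := h b hb; exact_mod_cast this

theorem pv_B_iff (serial : String) :
    is_valid_serial_number_alt serial = true
      ↔ ((serial.toList.length : Int) = 14 ∧ serial.toList.count '-' = 2
          ∧ serial.toList[4]? = some '-' ∧ serial.toList[9]? = some '-') := by
  unfold is_valid_serial_number_alt
  rw [PySem.Str.len_eq, PySem.Str.count_eq,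
    show ("-" : String).toList = ['-'] from rfl, pv_count_eq,
    PySem.Str.pyGet?_eq, PySem.Str.pyGet?_eq]
  simp only [PySem.Chars.pyGet?_eq_listPyGet?]
  rw [show (4 : Int) = ((4 : Nat) : Int) from rfl, PySem.List.pyGet?_natCast]
  rw [show (9 : Int) = ((9 : Nat) : Int) from rfl, PySem.List.pyGet?_natCast]
  simp [Bool.and_eq_true, beq_iff_eq, and_assoc]

theorem is_valid_serial_number_spec : Claim_equal_is_valid_serial_number := by
  intro serial _
  show is_valid_serial_number serial = is_valid_serial_number_alt serial
  have hsplitC : PySem.Chars.split? serial.toList ['-'] = some (pvParts serial.toList) := by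
    simp [PySem.Chars.split?, pv_splitOn_eq]
  have hmap := PySem.Str.split?_map serial "-"
  rw [show ("-" : String).toList = ['-'] from rfl, hsplitC] at hmap
  obtain ⟨blocks, hbl⟩ : ∃ blocks, PySem.Str.split? serial "-" = some blocks := by
    cases h : PySem.Str.split? serial "-" with
    | none => rw [h] at hmap; simp at hmap
    | some blocks => exact ⟨blocks, rfl⟩
  rw [hbl] at hmap
  have hmap' : blocks.map String.toList = pvParts serial.toList := by
    simpa using hmap
  by_cases hl : serial.toList.length = 14
  · have hBiff : is_valid_serial_number_alt serial = true
        ↔ (serial.toList.count '-' = 2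
            ∧ serial.toList[4]? = some '-' ∧ serial.toList[9]? = some '-') := by
      rw [pv_B_iff serial]
      constructor
      · rintro ⟨-, h1, h2, h3⟩; exact ⟨h1, h2, h3⟩
      · rintro ⟨h1, h2, h3⟩; exact ⟨by exact_mod_cast hl, h1, h2, h3⟩
    have hiff := (pv_A_iff serial blocks hbl hmap' hl).trans
      ((pv_main serial.toList hl).trans hBiff.symm)
    cases hav : is_valid_serial_number serial <;>
      cases hbv : is_valid_serial_number_alt serial <;> simp_all
  · have hA : is_valid_serial_number serial = false := by
      unfold is_valid_serial_number
      rw [PySem.Str.len_eq, if_pos (by intro h; exact hl (by exact_mod_cast h))]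
    have hB : is_valid_serial_number_alt serial = false := by
      unfold is_valid_serial_number_alt
      rw [PySem.Str.len_eq,
        show ((serial.toList.length : Int) == 14) = false from
          beq_eq_false_iff_ne.mpr (by intro h; exact hl (by exact_mod_cast h))]
      simp
    rw [hA, hB]
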